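-- pv_equiv track=rewrite | github.com/macnica0208/xiya-agent-dev | xiya_agent_v2/image/prompt_builder.py | _raw_requests_shoes_removed
-- ===== SOURCE A (Python) =====
-- def _raw_requests_shoes_removed(raw: str) -> bool:
--     return any(
--         marker in raw
--         for marker in (
--             "shoes removed",
--             "shoes off",
--             "both feet out of shoes",
--             "out of shoes",
--             "pair of sandals placed",
--             "sandals placed on the floor",
--             "remove shoes",
--             "takes off shoes",
--             "脱鞋",
--             "把鞋脱",
--         )
--     )
-- ===== SOURCE B (Python) =====
-- # B: single left-to-right pass over raw, testing all markers as prefixes at each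
-- # position, instead of ten independent substring scans.
-- _MARKERS = (
--     "shoes removed",
--     "shoes off",
--     "both feet out of shoes",
--     "out of shoes",
--     "pair of sandals placed",
--     "sandals placed on the floor",
--     "remove shoes",
--     "takes off shoes",
--     "脱鞋",
--     "把鞋脱",
-- )
--
-- def _raw_requests_shoes_removed(raw: str) -> bool:
--     return any(
--         raw.startswith(m, i)
--         for i in range(len(raw) + 1)
--         for m in _MARKERS
--     )
-- ===== Notes on version B (the rewrite author's own statement) =====
-- stated objective: alternative
-- what changed: B replaces A's ten independent membership scans of raw (one per marker) by a single left-to-right pass over the positions of raw, testing every marker as a prefix at each position; the marker tuple itself is shared data.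
import Mathlib
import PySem

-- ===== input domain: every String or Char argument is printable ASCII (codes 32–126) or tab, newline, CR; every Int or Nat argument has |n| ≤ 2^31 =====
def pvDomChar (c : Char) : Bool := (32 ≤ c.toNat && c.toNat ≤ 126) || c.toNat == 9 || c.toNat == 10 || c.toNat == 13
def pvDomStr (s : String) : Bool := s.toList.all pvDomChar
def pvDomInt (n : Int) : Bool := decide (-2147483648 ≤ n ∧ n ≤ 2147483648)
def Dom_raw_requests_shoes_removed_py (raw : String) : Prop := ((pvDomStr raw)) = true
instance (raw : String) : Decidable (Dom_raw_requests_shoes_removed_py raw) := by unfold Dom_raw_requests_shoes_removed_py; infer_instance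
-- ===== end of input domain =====

-- B replaces A's ten independent substring scans by a single pass over the positions of raw,
-- testing every marker as a prefix at each position (alternative structure, not claimed faster).

-- the marker tuple shared by both Pythons (same literals, same order)
def pvMarkers : List String :=
  ["shoes removed", "shoes off", "both feet out of shoes", "out of shoes",
   "pair of sandals placed", "sandals placed on the floor", "remove shoes",
   "takes off shoes", "脱鞋", "把鞋脱"]

-- ===== PORT A =====
-- any(marker in raw for marker in MARKERS)
def raw_requests_shoes_removed_py (raw : String) : Bool :=
  pvMarkers.any (fun marker => PySem.Str.isIn marker raw)

-- ===== PORT B =====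
-- any(raw.startswith(m, i) for i in range(len(raw)+1) for m in MARKERS);
-- raw.startswith(m, i) with 0 ≤ i ≤ len(raw) is exactly "m is a prefix of raw[i:]"
def raw_requests_shoes_removed_py_alt (raw : String) : Bool :=
  (List.range (raw.toList.length + 1)).any (fun i =>
    pvMarkers.any (fun m => m.toList.isPrefixOf (raw.toList.drop i)))

-- ===== PRECONDITION & SPEC =====
def Spec_raw_requests_shoes_removed_py (raw : String) (out : Bool) : Prop := out = raw_requests_shoes_removed_py_alt raw
instance (raw : String) (out : Bool) : Decidable (Spec_raw_requests_shoes_removed_py raw out) := by unfold Spec_raw_requests_shoes_removed_py; infer_instance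

-- ===== CLAIM (what is proved, stated in full; the proofs are below) =====
def Claim_equal_raw_requests_shoes_removed_py : Prop := ∀ (raw : String), Dom_raw_requests_shoes_removed_py raw → Spec_raw_requests_shoes_removed_py raw (raw_requests_shoes_removed_py raw)

-- ===== LEMMAS AND PROOFS =====

-- every marker is nonempty
theorem pvMarkers_ne_nil : ∀ m ∈ pvMarkers, m.toList ≠ [] := by decide

-- ===== VERDICT (by name: the statement is the Claim_ definition above) =====
theorem raw_requests_shoes_removed_py_spec : Claim_equal_raw_requests_shoes_removed_py := by
  intro raw _
  show raw_requests_shoes_removed_py raw = raw_requests_shoes_removed_py_alt raw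
  rw [Bool.eq_iff_iff]
  simp only [raw_requests_shoes_removed_py, raw_requests_shoes_removed_py_alt,
    List.any_eq_true, PySem.Str.isIn_eq, List.mem_range,
    ← PySem.Chars.exists_prefix_drop_iff_isIn, List.isPrefixOf_iff_prefix]
  constructor
  · rintro ⟨m, hmM, j, hpre⟩
    have hj : j ≤ raw.toList.length := by
      by_contra h
      rw [List.drop_eq_nil_of_le (by omega)] at hpre
      exact pvMarkers_ne_nil m hmM (List.prefix_nil.mp hpre)
    exact ⟨j, by omega, m, hmM, hpre⟩
  · rintro ⟨i, _, m, hmM, hpre⟩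
    exact ⟨m, hmM, i, hpre⟩
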